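-- pv_equiv track=rewrite | github.com/thelexiconlab/cochlear-full | forager/data/lexical_data/delete_dupes.py | find_first_dupes
-- ===== SOURCE A (Python) =====
-- def find_first_dupes(vocab_list: list[str]):
--     seen = {}
--     first_indices = []
--
--     for i, value in enumerate(vocab_list):
--         if value in seen:
--             if seen[value] == 1:  # Only add the first duplicate's index
--                 first_indices.append(vocab_list.index(value))
--             seen[value] += 1
--         else:
--             seen[value] = 1
--
--     return first_indices
-- ===== SOURCE B (Python) =====
-- def find_first_dupes(vocab_list: list[str]):
--     # Stage 1: index table value -> list of all occurrence positions.
--     positions = {}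
--     for i, value in enumerate(vocab_list):
--         positions.setdefault(value, []).append(i)
--     # Stage 2: for each duplicated value, pair (second occurrence, first occurrence).
--     pairs = [(idxs[1], idxs[0]) for idxs in positions.values() if len(idxs) >= 2]
--     # Stage 3: order by the second-occurrence position (A emits in that order).
--     pairs.sort(key=lambda p: p[0])
--     return [first for _second, first in pairs]
-- ===== Notes on version B (the rewrite author's own statement) =====
-- stated objective: faster
-- what changed: Replaces A's single pass with a count dict plus a repeated list.index rescan by three stages: build an index table value->all occurrence positions, form (second,first) index pairs for values occurring at least twice, and sort those pairs by second-occurrence position (A's emission order) before reading off the first indices.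
import Mathlib
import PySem

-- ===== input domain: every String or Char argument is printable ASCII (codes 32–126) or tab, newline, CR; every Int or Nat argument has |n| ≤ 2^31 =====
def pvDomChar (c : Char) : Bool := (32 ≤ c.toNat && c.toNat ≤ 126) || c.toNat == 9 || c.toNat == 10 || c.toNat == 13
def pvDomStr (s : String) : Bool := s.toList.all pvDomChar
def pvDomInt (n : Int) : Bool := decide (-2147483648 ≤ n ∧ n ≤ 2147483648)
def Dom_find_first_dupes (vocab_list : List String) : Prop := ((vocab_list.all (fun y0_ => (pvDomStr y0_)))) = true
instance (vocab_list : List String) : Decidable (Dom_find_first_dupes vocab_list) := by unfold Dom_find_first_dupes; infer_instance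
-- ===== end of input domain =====

-- B replaces A's count dict + repeated list.index scans with three stages: an index table
-- value -> occurrence positions, (second, first) pairs for duplicated values, and a sort
-- by second-occurrence position (objective: faster).

-- ===== PORT A =====
-- loop body of A: seen-count dict plus accumulated first-duplicate indices
def ffdStep (full : List String) (st : PySem.Dict String Int × List Int) (p : Int × String) :
    PySem.Dict String Int × List Int :=
  match st.1.get? p.2 with
  | some c =>
      (st.1.insert p.2 (c + 1),
       if c == 1 then st.2 ++ [(((PySem.List.index? full p.2).getD 0 : Nat) : Int)] else st.2)
  | none => (st.1.insert p.2 1, st.2)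

def find_first_dupes (vocab_list : List String) : List Int :=
  ((PySem.List.enumerate vocab_list 0).foldl (ffdStep vocab_list) (PySem.Dict.empty, [])).2

-- ===== PORT B =====
-- stage 1 loop body: positions.setdefault(value, []).append(i)
def ffdAltStep (d : PySem.Dict String (List Int)) (p : Int × String) :
    PySem.Dict String (List Int) :=
  d.modify p.2 [] (· ++ [p.1])

def find_first_dupes_alt (vocab_list : List String) : List Int :=
  let positions := (PySem.List.enumerate vocab_list 0).foldl ffdAltStep PySem.Dict.empty
  let pairs := (positions.values.filter (fun idxs => decide (2 ≤ idxs.length))).map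
      (fun idxs => (PySem.List.pyGetD idxs 1 0, PySem.List.pyGetD idxs 0 0))
  (PySem.List.sorted pairs (fun p => p.1) false).map (fun p => p.2)

-- ===== PRECONDITION & SPEC =====
def Spec_find_first_dupes (vocab_list : List String) (out : List Int) : Prop := out = find_first_dupes_alt vocab_list
instance (vocab_list : List String) (out : List Int) : Decidable (Spec_find_first_dupes vocab_list out) := by unfold Spec_find_first_dupes; infer_instance

-- ===== CLAIM (what is proved, stated in full; the proofs are below) =====
def Claim_equal_find_first_dupes : Prop := ∀ (vocab_list : List String), Dom_find_first_dupes vocab_list → Spec_find_first_dupes vocab_list (find_first_dupes vocab_list)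

-- ===== LEMMAS AND PROOFS =====

def pvOcc (full : List String) (v : String) : List Int :=
  ((PySem.List.enumerate full 0).filter (fun p => p.2 == v)).map (·.1)

lemma pvOcc_length (full : List String) (v : String) :
    (pvOcc full v).length = full.count v := by
  simp only [pvOcc, List.length_map, ← List.countP_eq_length_filter]
  conv_rhs => rw [← PySem.List.map_snd_enumerate full 0, List.count_eq_countP, List.countP_map]
  rfl

lemma pvOcc_append_singleton (full : List String) (x v : String) :
    pvOcc (full ++ [x]) v
      = pvOcc full v ++ (if x == v then [(full.length : Int)] else []) := by
  simp only [pvOcc, PySem.List.enumerate_append, List.filter_append, List.map_append]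
  congr 1
  simp [PySem.List.enumerate_cons, List.filter_cons]
  split_ifs <;> simp

def pvIdx (full : List String) (v : String) : Int := (((PySem.List.index? full v).getD 0 : Nat) : Int)
def pvDupes (full : List String) (l : List (Int × String)) : List (Int × String) :=
  l.filter (fun p => PySem.List.count (PySem.List.slice full none (some p.1)) p.2 == 1)


lemma ffd_loop (full : List String) :
    ∀ (rest pref : List String) (seen : PySem.Dict String Int) (acc : List Int),
      full = pref ++ rest →
      (∀ v, seen.get? v = if pref.count v = 0 then none else some ((pref.count v : Nat) : Int)) →
      ((PySem.List.enumerate rest (pref.length : Int)).foldl (ffdStep full) (seen, acc)).2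
        = acc ++ (pvDupes full (PySem.List.enumerate rest (pref.length : Int))).map
            (fun p => pvIdx full p.2) := by
  intro rest
  induction rest with
  | nil => intro pref seen acc hfull hinv; simp [PySem.List.enumerate_nil, pvDupes]
  | cons v rest ih =>
      intro pref seen acc hfull hinv
      have hslice : PySem.List.slice full none (some (pref.length : Int)) = pref := by
        rw [PySem.List.slice_to_natCast, hfull, List.take_left' rfl]
      rw [PySem.List.enumerate_cons, List.foldl_cons, pvDupes, List.filter_cons]
      have hstep : ffdStep full (seen, acc) ((pref.length : Int), v)
          = (seen.insert v (((pref.count v : Nat) : Int) + 1),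
             if pref.count v == 1
               then acc ++ [pvIdx full v] else acc) := by
        simp only [ffdStep, hinv v, pvIdx]
        by_cases h0 : pref.count v = 0
        · simp [h0]
        · by_cases h1 : pref.count v = 1 <;> simp [h0, h1]
      rw [hstep]
      have hinv' : ∀ w, (seen.insert v (((pref.count v : Nat) : Int) + 1)).get? w
          = if (pref ++ [v]).count w = 0 then none
            else some ((((pref ++ [v]).count w : Nat)) : Int) := by
        intro w
        by_cases hw : w = v
        · subst hw
          rw [PySem.Dict.get?_insert_self]
          simp [List.count_append]
        · rw [PySem.Dict.get?_insert_of_ne _ _ hw, hinv w]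
          have : (pref ++ [v]).count w = pref.count w := by
            simp [List.count_append, Ne.symm hw]
          rw [this]
      have hfull' : full = (pref ++ [v]) ++ rest := by simpa [List.append_assoc] using hfull
      have hlen : (pref.length : Int) + 1 = (((pref ++ [v]).length : Nat) : Int) := by
        simp
      have hrec := fun (acc' : List Int) =>
        ih (pref ++ [v]) (seen.insert v (((pref.count v : Nat) : Int) + 1)) acc' hfull' hinv'
      simp only [hslice, PySem.List.count_eq, pvDupes] at hrec ⊢
      by_cases h1 : pref.count v = 1
      · have hb : (pref.count v == 1) = true := by simp [h1]
        rw [hb]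
        simp only [if_true]
        rw [hlen, hrec (acc ++ [pvIdx full v])]
        simp [List.append_assoc]
      · have hb : (pref.count v == 1) = false := by simp [h1]
        rw [hb]
        simp only [Bool.false_eq_true, if_false]
        rw [hlen]
        exact hrec acc

lemma pvOcc_head_eq_pvIdx (full : List String) (v : String) (hv : v ∈ full) :
    PySem.List.pyGetD (pvOcc full v) 0 0 = pvIdx full v := by
  obtain ⟨k, hk⟩ := Option.isSome_iff_exists.mp ((PySem.List.index?_isSome_iff full v).mpr hv)
  obtain ⟨pre, suf, hfull, hlen, hpre⟩ := (PySem.List.index?_eq_some_iff full v k).mp hk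
  subst hfull
  have hfilter : (PySem.List.enumerate pre 0).filter (fun p => p.2 == v) = [] := by
    rw [List.filter_eq_nil_iff]
    intro p hp
    obtain ⟨j, hj, rfl⟩ := (PySem.List.mem_enumerate_iff _ _ _).mp hp
    intro h
    have : pre[j] = v := by simpa using h
    exact absurd (this ▸ List.getElem_mem hj) hpre
  simp only [pvOcc, PySem.List.enumerate_append, List.filter_append, hfilter,
    PySem.List.enumerate_cons, List.filter_cons, List.nil_append]
  simp only [pvIdx, hk]
  simp [hlen]

lemma mem_pvDupes_snd_mem (full : List String) (p : Int × String)
    (hp : p ∈ pvDupes full (PySem.List.enumerate full 0)) : p.2 ∈ full := by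
  have hm := List.mem_of_mem_filter hp
  obtain ⟨k, hk, rfl⟩ := (PySem.List.mem_enumerate_iff _ _ _).mp hm
  exact List.getElem_mem hk

lemma pvDupes_append_singleton (full : List String) (x : String) :
    pvDupes (full ++ [x]) (PySem.List.enumerate (full ++ [x]) 0)
      = pvDupes full (PySem.List.enumerate full 0)
        ++ (if full.count x == 1 then [((full.length : Int), x)] else []) := by
  simp only [pvDupes, PySem.List.enumerate_append, List.filter_append]
  congr 1
  · apply List.filter_congr
    intro p hp
    obtain ⟨k, hk, rfl⟩ := (PySem.List.mem_enumerate_iff _ _ _).mp hp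
    simp only [zero_add, PySem.List.slice_to_natCast]
    rw [List.take_append_of_le_length (le_of_lt hk)]
  · simp only [zero_add, PySem.List.enumerate_cons, PySem.List.enumerate_nil, List.filter_cons]
    rw [PySem.List.slice_to_natCast]
    simp only [List.take_left, PySem.List.count_eq]
    split_ifs with h <;> simp_all

def pvT (full : List String) : List (Int × Int) :=
  (pvDupes full (PySem.List.enumerate full 0)).map
    (fun p => (p.1, PySem.List.pyGetD (pvOcc full p.2) 0 0))

lemma pvT_pairwise (full : List String) :
    (pvT full).Pairwise (fun a b => a.1 < b.1) := by
  have h := (PySem.List.pairwise_lt_enumerate full 0).filter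
      (fun p => PySem.List.count (PySem.List.slice full none (some p.1)) p.2 == 1)
  exact h.map _ (fun a b hab => hab)

def pvPairs (full : List String) : List (Int × Int) :=
  ((PySem.Set.ofList full).filter (fun v => decide (2 ≤ (pvOcc full v).length))).map
    (fun v => (PySem.List.pyGetD (pvOcc full v) 1 0, PySem.List.pyGetD (pvOcc full v) 0 0))

lemma positions_getD (full : List String) (v : String) :
    ((PySem.List.enumerate full 0).foldl ffdAltStep PySem.Dict.empty).getD v []
      = pvOcc full v := by
  have hswap : (PySem.List.enumerate full 0).foldl ffdAltStep PySem.Dict.empty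
      = ((PySem.List.enumerate full 0).map (fun p => (p.2, p.1))).foldl
          (fun d p => d.modify p.1 [] (· ++ [p.2])) PySem.Dict.empty := by
    rw [List.foldl_map]
    rfl
  rw [hswap, PySem.Dict.getD_foldl_modify_append]
  simp [pvOcc, List.filter_map, List.map_map, Function.comp_def]

lemma positions_keys (full : List String) :
    ((PySem.List.enumerate full 0).foldl ffdAltStep PySem.Dict.empty).keys
      = PySem.Set.ofList full := by
  have h := PySem.Dict.keys_foldl_modify_key (l := PySem.List.enumerate full 0)
      (key := fun p : Int × String => p.2) (d0 := ([] : List Int))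
      (f := fun _ p => (· ++ [p.1])) (d := PySem.Dict.empty)
  simpa [ffdAltStep, PySem.List.map_snd_enumerate] using h

lemma positions_keys_nodup (full : List String) :
    ((PySem.List.enumerate full 0).foldl ffdAltStep PySem.Dict.empty).keys.Nodup := by
  exact PySem.Dict.nodup_keys_foldl_modify_key (PySem.List.enumerate full 0)
    (fun p : Int × String => p.2) ([] : List Int) (fun _ p => (· ++ [p.1])) PySem.Dict.empty
    (by simp)

lemma pyGetD_append_singleton_of_lt (l : List Int) (a d : Int) (i : Int) (h0 : 0 ≤ i)
    (h : i < (l.length : Int)) :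
    PySem.List.pyGetD (l ++ [a]) i d = PySem.List.pyGetD l i d := by
  rw [PySem.List.pyGetD_eq_getElem (l ++ [a]) d h0 (by simp; omega),
    PySem.List.pyGetD_eq_getElem l d h0 h]
  rw [List.getElem_append_left (by omega)]

lemma pvT_perm_pvPairs (full : List String) : (pvT full).Perm (pvPairs full) := by
  induction full using List.reverseRecOn with
  | nil =>
      simp [pvT, pvPairs, pvDupes, PySem.List.enumerate_nil]
  | append_singleton full x ih =>
      have hocc_ne : ∀ v, v ≠ x → pvOcc (full ++ [x]) v = pvOcc full v := by
        intro v hv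
        rw [pvOcc_append_singleton]
        have : (x == v) = false := by simp [Ne.symm hv]
        simp [this]
      have hocc_x : pvOcc (full ++ [x]) x = pvOcc full x ++ [(full.length : Int)] := by
        rw [pvOcc_append_singleton]; simp
      -- pvT (full ++ [x]) = pvT full ++ (the new second occurrence, if any)
      have hT : pvT (full ++ [x]) = pvT full
          ++ (if full.count x == 1
                then [((full.length : Int), PySem.List.pyGetD (pvOcc (full ++ [x]) x) 0 0)]
                else []) := by
        rw [pvT, pvDupes_append_singleton, List.map_append]
        congr 1
        · apply List.map_congr_left
          intro p hp
          have hmem : p.2 ∈ full := mem_pvDupes_snd_mem full p hp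
          by_cases hpx : p.2 = x
          · rw [hpx, hocc_x, pyGetD_append_singleton_of_lt _ _ _ 0 le_rfl
              (by rw [pvOcc_length]
                  exact_mod_cast List.count_pos_iff.mpr (hpx ▸ hmem))]
          · rw [hocc_ne p.2 hpx]
        · split_ifs with h <;> simp
      rw [hT, pvPairs, PySem.Set.ofList_append_singleton]
      by_cases hmem : x ∈ full
      · have hcontains : PySem.Set.contains (PySem.Set.ofList full) x = true := by
          simp only [PySem.Set.contains_eq_listContains, List.contains_eq_mem,
            PySem.Set.mem_ofList, decide_eq_true_eq]
          exact hmem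
        have hadd : PySem.Set.add (PySem.Set.ofList full) x = PySem.Set.ofList full := by
          simp only [PySem.Set.add, hcontains]
          simp
        rw [hadd]
        by_cases h1 : full.count x = 1
        · -- x's second occurrence: one pair is inserted at x's set position
          obtain ⟨a, b, hs⟩ := List.append_of_mem ((PySem.Set.mem_ofList full x).mpr hmem)
          have hnd : (PySem.Set.ofList full).Nodup := PySem.Set.nodup_ofList full
          have hxab : x ∉ a ++ b := by
            rw [hs] at hnd
            exact (List.nodup_cons.mp (List.perm_middle.nodup hnd)).1
          have hxa : x ∉ a := fun h => hxab (List.mem_append_left b h)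
          have hxb : x ∉ b := fun h => hxab (List.mem_append_right a h)
          obtain ⟨j, hj⟩ := List.length_eq_one_iff.mp (by rw [pvOcc_length, h1])
          have hfx : (PySem.List.pyGetD (pvOcc (full ++ [x]) x) 1 0,
              PySem.List.pyGetD (pvOcc (full ++ [x]) x) 0 0)
              = ((full.length : Int), j) := by
            rw [hocc_x, hj]
            rfl
          have hpnew_x : (decide (2 ≤ (pvOcc (full ++ [x]) x).length)) = true := by
            rw [hocc_x, hj]; simp
          have hpold_x : (decide (2 ≤ (pvOcc full x).length)) = false := by
            rw [hj]; simp
          have hTx : PySem.List.pyGetD (pvOcc (full ++ [x]) x) 0 0 = j := by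
            rw [hocc_x, hj]; rfl
          have hcongr_filter : ∀ (l : List String), x ∉ l →
              l.filter (fun v => decide (2 ≤ (pvOcc (full ++ [x]) v).length))
                = l.filter (fun v => decide (2 ≤ (pvOcc full v).length)) := by
            intro l hl
            apply List.filter_congr
            intro v hv
            rw [hocc_ne v (fun h => hl (h ▸ hv))]
          have hcongr_map : ∀ (l : List String), x ∉ l →
              l.map (fun v => (PySem.List.pyGetD (pvOcc (full ++ [x]) v) 1 0,
                  PySem.List.pyGetD (pvOcc (full ++ [x]) v) 0 0))
                = l.map (fun v => (PySem.List.pyGetD (pvOcc full v) 1 0,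
                  PySem.List.pyGetD (pvOcc full v) 0 0)) := by
            intro l hl
            apply List.map_congr_left
            intro v hv
            rw [hocc_ne v (fun h => hl (h ▸ hv))]
          rw [hs, List.filter_append, List.filter_cons, hpnew_x, if_pos rfl]
          rw [hcongr_filter a hxa, hcongr_filter b hxb, List.map_append, List.map_cons, hfx]
          rw [hcongr_map _ (fun h => hxa (List.mem_of_mem_filter h)),
            hcongr_map _ (fun h => hxb (List.mem_of_mem_filter h))]
          have hb1 : (full.count x == 1) = true := by simp [h1]
          rw [hb1, if_pos rfl, hTx]
          have hold : pvPairs full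
              = (a.filter (fun v => decide (2 ≤ (pvOcc full v).length))).map
                  (fun v => (PySem.List.pyGetD (pvOcc full v) 1 0,
                    PySem.List.pyGetD (pvOcc full v) 0 0))
                ++ (b.filter (fun v => decide (2 ≤ (pvOcc full v).length))).map
                  (fun v => (PySem.List.pyGetD (pvOcc full v) 1 0,
                    PySem.List.pyGetD (pvOcc full v) 0 0)) := by
            rw [pvPairs, hs, List.filter_append, List.filter_cons, hpold_x,
              if_neg (by simp), List.map_append]
          rw [hold] at ih
          exact ((ih.append_right _).trans
            (List.perm_append_singleton _ _)).trans List.perm_middle.symm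
        · -- third or later occurrence of x: nothing changes
          have hge2 : 2 ≤ full.count x := by
            have := List.count_pos_iff.mpr hmem
            omega
          have hb1 : (full.count x == 1) = false := by simp [h1]
          rw [hb1, if_neg (by simp), List.append_nil]
          have hfilter : (PySem.Set.ofList full).filter
                (fun v => decide (2 ≤ (pvOcc (full ++ [x]) v).length))
              = (PySem.Set.ofList full).filter
                (fun v => decide (2 ≤ (pvOcc full v).length)) := by
            apply List.filter_congr
            intro v _
            by_cases hv : v = x
            · subst hv
              rw [hocc_x]
              simp only [List.length_append, List.length_singleton, pvOcc_length]
              simp only [decide_eq_decide]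
              omega
            · rw [hocc_ne v hv]
          rw [hfilter]
          have hmap : ((PySem.Set.ofList full).filter
                (fun v => decide (2 ≤ (pvOcc full v).length))).map
                (fun v => (PySem.List.pyGetD (pvOcc (full ++ [x]) v) 1 0,
                  PySem.List.pyGetD (pvOcc (full ++ [x]) v) 0 0))
              = ((PySem.Set.ofList full).filter
                (fun v => decide (2 ≤ (pvOcc full v).length))).map
                (fun v => (PySem.List.pyGetD (pvOcc full v) 1 0,
                  PySem.List.pyGetD (pvOcc full v) 0 0)) := by
            apply List.map_congr_left
            intro v hv
            by_cases hvx : v = x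
            · subst hvx
              have hlen2 : (1 : Int) < ((pvOcc full v).length : Int) := by
                rw [pvOcc_length]; exact_mod_cast hge2
              rw [hocc_x,
                pyGetD_append_singleton_of_lt _ _ _ 1 (by omega) hlen2,
                pyGetD_append_singleton_of_lt _ _ _ 0 le_rfl (by omega)]
            · rw [hocc_ne v hvx]
          rw [hmap]
          exact ih
      · -- first occurrence of a brand-new value: nothing changes
        have hc0 : full.count x = 0 := List.count_eq_zero.mpr hmem
        have hcontains : PySem.Set.contains (PySem.Set.ofList full) x = false := by
          simp only [PySem.Set.contains_eq_listContains, List.contains_eq_mem,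
            PySem.Set.mem_ofList]
          simp [hmem]
        have hadd : PySem.Set.add (PySem.Set.ofList full) x
            = PySem.Set.ofList full ++ [x] := by
          simp only [PySem.Set.add, hcontains, Bool.false_eq_true]
          simp
        have hocc0 : pvOcc full x = [] := by
          have := pvOcc_length full x
          rw [hc0] at this
          exact List.length_eq_zero_iff.mp this
        have hb1 : (full.count x == 1) = false := by simp [hc0]
        rw [hb1, if_neg (by simp), List.append_nil, hadd, List.filter_append]
        have hpx : (decide (2 ≤ (pvOcc (full ++ [x]) x).length)) = false := by
          rw [hocc_x, hocc0]; simp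
        have hxnil : [x].filter (fun v => decide (2 ≤ (pvOcc (full ++ [x]) v).length)) = [] := by
          simp [hpx]
        rw [hxnil, List.append_nil]
        have hne : ∀ v ∈ PySem.Set.ofList full, v ≠ x := by
          intro v hv h
          exact hmem (h ▸ (PySem.Set.mem_ofList full v).mp hv)
        have hfilter : (PySem.Set.ofList full).filter
              (fun v => decide (2 ≤ (pvOcc (full ++ [x]) v).length))
            = (PySem.Set.ofList full).filter
              (fun v => decide (2 ≤ (pvOcc full v).length)) := by
          apply List.filter_congr
          intro v hv
          rw [hocc_ne v (hne v hv)]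
        rw [hfilter]
        have hmap : ((PySem.Set.ofList full).filter
              (fun v => decide (2 ≤ (pvOcc full v).length))).map
              (fun v => (PySem.List.pyGetD (pvOcc (full ++ [x]) v) 1 0,
                PySem.List.pyGetD (pvOcc (full ++ [x]) v) 0 0))
            = ((PySem.Set.ofList full).filter
              (fun v => decide (2 ≤ (pvOcc full v).length))).map
              (fun v => (PySem.List.pyGetD (pvOcc full v) 1 0,
                PySem.List.pyGetD (pvOcc full v) 0 0)) := by
          apply List.map_congr_left
          intro v hv
          rw [hocc_ne v (hne v (List.mem_of_mem_filter hv))]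
        rw [hmap]
        exact ih

lemma alt_eq_map_pvT (full : List String) :
    find_first_dupes_alt full = (pvT full).map (fun p => p.2) := by
  unfold find_first_dupes_alt
  dsimp only
  have hvals : ((PySem.List.enumerate full 0).foldl ffdAltStep PySem.Dict.empty).values
      = (PySem.Set.ofList full).map (fun v => pvOcc full v) := by
    rw [PySem.Dict.values_eq_map_keys _ (positions_keys_nodup full) ([] : List Int),
      positions_keys full]
    exact List.map_congr_left (fun v _ => positions_getD full v)
  rw [hvals, List.filter_map, List.map_map]
  have hsorted : PySem.List.sorted (pvPairs full) (fun p => p.1) false = pvT full :=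
    PySem.List.sorted_eq_of_perm_of_pairwise_lt (pvPairs full) (pvT full) (fun p => p.1)
      (pvT_perm_pvPairs full) (pvT_pairwise full)
  have hp : (List.filter ((fun idxs => decide (2 ≤ idxs.length)) ∘ fun v => pvOcc full v)
        (PySem.Set.ofList full)).map
      ((fun idxs => (PySem.List.pyGetD idxs 1 0, PySem.List.pyGetD idxs 0 0)) ∘ fun v => pvOcc full v)
      = pvPairs full := by
    simp [pvPairs, Function.comp_def]
  rw [hp, hsorted]

-- ===== VERDICT (by name: the statement is the Claim_ definition above) =====
theorem find_first_dupes_spec : Claim_equal_find_first_dupes := by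
  intro vocab_list _
  unfold Spec_find_first_dupes
  have hA := ffd_loop vocab_list vocab_list [] PySem.Dict.empty [] (by simp)
    (by intro v; simp [PySem.Dict.get?_empty])
  simp only [List.length_nil, Nat.cast_zero, List.nil_append] at hA
  rw [find_first_dupes, hA, alt_eq_map_pvT, pvT, List.map_map]
  refine List.map_congr_left ?_
  intro p hp
  have h2 : p.2 ∈ vocab_list := mem_pvDupes_snd_mem vocab_list p hp
  simp [Function.comp, pvOcc_head_eq_pvIdx vocab_list p.2 h2]
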